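-- pv_equiv track=rewrite | github.com/Ahmed-Ali-313/Hackathon-I-Physical-AI-Humanoid-Robotics-Textbook | backend/src/utils/validation.py | count_headers
-- ===== SOURCE A (Python) =====
-- from typing import List, Dict, Tuple
--
-- def count_headers(markdown: str) -> Dict[str, int]:
--     """
--     Count markdown headers by level.
--
--     Args:
--         markdown: Markdown content
--
--     Returns:
--         Dictionary with header counts by level (e.g., {'h1': 1, 'h2': 5, 'h3': 10})
--     """
--     counts = {'h1': 0, 'h2': 0, 'h3': 0, 'h4': 0, 'h5': 0, 'h6': 0}
--
--     # Match headers at start of line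
--     for line in markdown.split('\n'):
--         line = line.strip()
--         if line.startswith('# '):
--             counts['h1'] += 1
--         elif line.startswith('## '):
--             counts['h2'] += 1
--         elif line.startswith('### '):
--             counts['h3'] += 1
--         elif line.startswith('#### '):
--             counts['h4'] += 1
--         elif line.startswith('##### '):
--             counts['h5'] += 1
--         elif line.startswith('###### '):
--             counts['h6'] += 1
--
--     return counts
-- ===== SOURCE B (Python) =====
-- def count_headers(markdown: str):
--     """Count markdown headers by level (h1..h6)."""
--     lines = [ln.strip() for ln in markdown.split('\n')]
--     return {'h%d' % k: sum(1 for ln in lines if ln.startswith('#' * k + ' '))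
--             for k in range(1, 7)}
-- ===== Notes on version B (the rewrite author's own statement) =====
-- stated objective: alternative
-- what changed: Instead of a single pass dispatching each line through a six-way startswith elif chain into a mutable counter dict, B strips all lines once and then builds the result by a dict comprehension over the levels 1..6, counting for each level independently the lines that start with that exact '#'*k + ' ' prefix (the six prefixes are mutually exclusive, so the per-level counts equal A's elif tallies).
import Mathlib
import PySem

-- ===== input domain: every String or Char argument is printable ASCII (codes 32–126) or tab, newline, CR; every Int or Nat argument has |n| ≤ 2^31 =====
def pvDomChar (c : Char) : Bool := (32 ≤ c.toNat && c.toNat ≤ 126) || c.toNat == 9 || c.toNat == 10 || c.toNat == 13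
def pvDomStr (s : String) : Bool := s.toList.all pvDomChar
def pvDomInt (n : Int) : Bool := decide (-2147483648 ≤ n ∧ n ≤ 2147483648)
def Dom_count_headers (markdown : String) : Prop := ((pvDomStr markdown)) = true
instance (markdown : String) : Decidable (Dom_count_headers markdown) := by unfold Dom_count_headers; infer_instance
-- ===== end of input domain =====

-- B replaces A's single pass with a mutable counter dict and a six-way startswith elif chain
-- by stripping the lines once and then counting, for each level 1..6 independently, the lines
-- with that exact '#'*k + ' ' prefix (a dict comprehension over the levels; objective: alternative).

-- ===== PORT A =====
-- the loop body of A: strip the line, then the elif chain of startswith tests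
def pvStepA (d : PySem.Dict String Int) (raw : List Char) : PySem.Dict String Int :=
  let ln := PySem.Chars.strip raw
  if PySem.Chars.startswith ln ['#', ' '] then d.modify "h1" 0 (· + 1)
  else if PySem.Chars.startswith ln ['#', '#', ' '] then d.modify "h2" 0 (· + 1)
  else if PySem.Chars.startswith ln ['#', '#', '#', ' '] then d.modify "h3" 0 (· + 1)
  else if PySem.Chars.startswith ln ['#', '#', '#', '#', ' '] then d.modify "h4" 0 (· + 1)
  else if PySem.Chars.startswith ln ['#', '#', '#', '#', '#', ' '] then d.modify "h5" 0 (· + 1)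
  else if PySem.Chars.startswith ln ['#', '#', '#', '#', '#', '#', ' '] then d.modify "h6" 0 (· + 1)
  else d

def count_headers (markdown : String) : List (String × Int) :=
  let counts : PySem.Dict String Int :=
    PySem.Dict.mk [("h1", 0), ("h2", 0), ("h3", 0), ("h4", 0), ("h5", 0), ("h6", 0)]
  ((PySem.Chars.splitOn markdown.toList ['\n']).foldl pvStepA counts).items

-- ===== PORT B =====
-- Source B: strip all lines once, then a dict comprehension over k in range(1, 7); the key is
-- 'h%d' % k and the value sum(1 for ln in lines if ln.startswith('#'*k + ' ')) is the number
-- of stripped lines with that prefix (ported as filter + length); keys h1..h6 are distinct,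
-- so the dict's items are exactly this list in comprehension order
def count_headers_alt (markdown : String) : List (String × Int) :=
  let lines := (PySem.Chars.splitOn markdown.toList ['\n']).map PySem.Chars.strip
  (PySem.List.pyRange 1 7 1).map (fun k =>
    ("h" ++ PySem.Int.toStr k,
      ((lines.filter (fun ln =>
          PySem.Chars.startswith ln (List.replicate k.toNat '#' ++ [' ']))).length : Int)))

-- ===== PRECONDITION & SPEC =====
def Spec_count_headers (markdown : String) (out : List (String × Int)) : Prop := out = count_headers_alt markdown
instance (markdown : String) (out : List (String × Int)) : Decidable (Spec_count_headers markdown out) := by unfold Spec_count_headers; infer_instance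

-- ===== CLAIM (what is proved, stated in full; the proofs are below) =====
def Claim_equal_count_headers : Prop := ∀ (markdown : String), Dom_count_headers markdown → Spec_count_headers markdown (count_headers markdown)

-- ===== LEMMAS AND PROOFS =====

-- startswith against '#'*k ++ ' ' classifies the leading-'#' count exactly
theorem pv_sw_iff (k N : Nat) (m : List Char) (hm : m.head? ≠ some '#') :
    PySem.Chars.startswith (List.replicate N '#' ++ m) (List.replicate k '#' ++ [' ']) = true ↔
      (N = k ∧ m.head? = some ' ') := by
  induction k generalizing N with
  | zero =>
    cases N with
    | zero =>
      cases m with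
      | nil => simp [PySem.Chars.startswith_iff]
      | cons c t =>
        simp only [List.replicate_zero, List.nil_append, PySem.Chars.startswith_iff,
          List.cons_prefix_cons, List.nil_prefix, and_true, List.head?_cons,
          Option.some.injEq, true_and]
        exact eq_comm
    | succ j =>
      simp [PySem.Chars.startswith_iff, List.replicate_succ, List.cons_prefix_cons,
        show ¬(' ' = '#') by decide]
  | succ k ih =>
    cases N with
    | zero =>
      cases m with
      | nil => simp [PySem.Chars.startswith_iff, List.replicate_succ]
      | cons c t =>
        have hc : c ≠ '#' := by intro h; exact hm (by simp [h])
        simp [PySem.Chars.startswith_iff, List.replicate_succ, List.cons_prefix_cons,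
          Ne.symm hc]
    | succ j =>
      simp only [List.replicate_succ, List.cons_append]
      rw [PySem.Chars.startswith_iff, List.cons_prefix_cons, ← PySem.Chars.startswith_iff, ih j]
      constructor
      · rintro ⟨-, hjk, hsp⟩; exact ⟨by omega, hsp⟩
      · rintro ⟨hjk, hsp⟩; exact ⟨rfl, by omega, hsp⟩

-- every list of characters splits as its leading '#'-run plus a rest not starting with '#'
theorem pv_decomp (s : List Char) :
    ∃ N m, s = List.replicate N '#' ++ m ∧ m.head? ≠ some '#' := by
  refine ⟨(s.takeWhile (· == '#')).length, s.dropWhile (· == '#'), ?_, ?_⟩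
  · have ht : s.takeWhile (· == '#') = List.replicate (s.takeWhile (· == '#')).length '#' := by
      apply List.eq_replicate_of_mem
      intro c hc
      simpa using List.mem_takeWhile_imp hc
    conv_lhs => rw [← List.takeWhile_append_dropWhile (p := (· == '#')) (l := s)]
    rw [← ht]
  · intro h
    have := List.head?_dropWhile_not (· == '#') s
    rw [h] at this
    simp at this

-- the six header prefixes are mutually exclusive on any one line
theorem pv_excl (s : List Char) (j k : Nat) (hjk : j ≠ k)
    (h : PySem.Chars.startswith s (List.replicate j '#' ++ [' ']) = true) :
    PySem.Chars.startswith s (List.replicate k '#' ++ [' ']) = false := by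
  obtain ⟨N, m, rfl, hm⟩ := pv_decomp s
  cases hb : PySem.Chars.startswith (List.replicate N '#' ++ m) (List.replicate k '#' ++ [' ']) with
  | false => rfl
  | true =>
    exact absurd (((pv_sw_iff k N m hm).mp hb).1 ▸ ((pv_sw_iff j N m hm).mp h).1.symm) hjk

-- the loop of A, started from any six counts, adds the per-prefix tallies
theorem pv_fold_items (ls : List (List Char)) (a1 a2 a3 a4 a5 a6 : Int) :
    ((ls.foldl pvStepA (PySem.Dict.mk
        [("h1", a1), ("h2", a2), ("h3", a3), ("h4", a4), ("h5", a5), ("h6", a6)])).items) =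
      [("h1", a1 + ls.countP (fun r => PySem.Chars.startswith (PySem.Chars.strip r) ['#', ' '])),
       ("h2", a2 + ls.countP (fun r => PySem.Chars.startswith (PySem.Chars.strip r) ['#', '#', ' '])),
       ("h3", a3 + ls.countP (fun r => PySem.Chars.startswith (PySem.Chars.strip r) ['#', '#', '#', ' '])),
       ("h4", a4 + ls.countP (fun r => PySem.Chars.startswith (PySem.Chars.strip r) ['#', '#', '#', '#', ' '])),
       ("h5", a5 + ls.countP (fun r => PySem.Chars.startswith (PySem.Chars.strip r) ['#', '#', '#', '#', '#', ' '])),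
       ("h6", a6 + ls.countP (fun r => PySem.Chars.startswith (PySem.Chars.strip r) ['#', '#', '#', '#', '#', '#', ' ']))] := by
  induction ls generalizing a1 a2 a3 a4 a5 a6 with
  | nil => simp
  | cons l ls ih =>
    rw [List.foldl_cons]
    by_cases h1 : PySem.Chars.startswith (PySem.Chars.strip l) ['#', ' '] = true
    · have e2 : PySem.Chars.startswith (PySem.Chars.strip l) ['#', '#', ' '] = false :=
      pv_excl _ 1 2 (by omega) h1
      have e3 : PySem.Chars.startswith (PySem.Chars.strip l) ['#', '#', '#', ' '] = false :=
      pv_excl _ 1 3 (by omega) h1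
      have e4 : PySem.Chars.startswith (PySem.Chars.strip l) ['#', '#', '#', '#', ' '] = false :=
      pv_excl _ 1 4 (by omega) h1
      have e5 : PySem.Chars.startswith (PySem.Chars.strip l) ['#', '#', '#', '#', '#', ' '] = false :=
      pv_excl _ 1 5 (by omega) h1
      have e6 : PySem.Chars.startswith (PySem.Chars.strip l) ['#', '#', '#', '#', '#', '#', ' '] = false :=
      pv_excl _ 1 6 (by omega) h1
      have hd : pvStepA (PySem.Dict.mk
          [("h1", a1), ("h2", a2), ("h3", a3), ("h4", a4), ("h5", a5), ("h6", a6)]) l = PySem.Dict.mk [("h1", a1 + 1), ("h2", a2), ("h3", a3), ("h4", a4), ("h5", a5), ("h6", a6)] := by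
        simp [pvStepA, h1, PySem.Dict.modify, PySem.Dict.insert,
          PySem.Dict.getD, PySem.Dict.get?, PySem.Dict.contains]
      rw [hd, ih]
      simp only [List.countP_cons, h1, e2, e3, e4, e5, e6, if_true, Bool.false_eq_true, if_false,
        List.cons.injEq, Prod.mk.injEq, true_and, and_true]
      push_cast
      omega
    rw [Bool.not_eq_true] at h1
    by_cases h2 : PySem.Chars.startswith (PySem.Chars.strip l) ['#', '#', ' '] = true
    · have e3 : PySem.Chars.startswith (PySem.Chars.strip l) ['#', '#', '#', ' '] = false :=
      pv_excl _ 2 3 (by omega) h2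
      have e4 : PySem.Chars.startswith (PySem.Chars.strip l) ['#', '#', '#', '#', ' '] = false :=
      pv_excl _ 2 4 (by omega) h2
      have e5 : PySem.Chars.startswith (PySem.Chars.strip l) ['#', '#', '#', '#', '#', ' '] = false :=
      pv_excl _ 2 5 (by omega) h2
      have e6 : PySem.Chars.startswith (PySem.Chars.strip l) ['#', '#', '#', '#', '#', '#', ' '] = false :=
      pv_excl _ 2 6 (by omega) h2
      have hd : pvStepA (PySem.Dict.mk
          [("h1", a1), ("h2", a2), ("h3", a3), ("h4", a4), ("h5", a5), ("h6", a6)]) l = PySem.Dict.mk [("h1", a1), ("h2", a2 + 1), ("h3", a3), ("h4", a4), ("h5", a5), ("h6", a6)] := by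
        simp [pvStepA, h1, h2, PySem.Dict.modify, PySem.Dict.insert,
          PySem.Dict.getD, PySem.Dict.get?, PySem.Dict.contains]
      rw [hd, ih]
      simp only [List.countP_cons, h1, h2, e3, e4, e5, e6, if_true, Bool.false_eq_true, if_false,
        List.cons.injEq, Prod.mk.injEq, true_and, and_true]
      push_cast
      omega
    rw [Bool.not_eq_true] at h2
    by_cases h3 : PySem.Chars.startswith (PySem.Chars.strip l) ['#', '#', '#', ' '] = true
    · have e4 : PySem.Chars.startswith (PySem.Chars.strip l) ['#', '#', '#', '#', ' '] = false :=
      pv_excl _ 3 4 (by omega) h3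
      have e5 : PySem.Chars.startswith (PySem.Chars.strip l) ['#', '#', '#', '#', '#', ' '] = false :=
      pv_excl _ 3 5 (by omega) h3
      have e6 : PySem.Chars.startswith (PySem.Chars.strip l) ['#', '#', '#', '#', '#', '#', ' '] = false :=
      pv_excl _ 3 6 (by omega) h3
      have hd : pvStepA (PySem.Dict.mk
          [("h1", a1), ("h2", a2), ("h3", a3), ("h4", a4), ("h5", a5), ("h6", a6)]) l = PySem.Dict.mk [("h1", a1), ("h2", a2), ("h3", a3 + 1), ("h4", a4), ("h5", a5), ("h6", a6)] := by
        simp [pvStepA, h1, h2, h3, PySem.Dict.modify, PySem.Dict.insert,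
          PySem.Dict.getD, PySem.Dict.get?, PySem.Dict.contains]
      rw [hd, ih]
      simp only [List.countP_cons, h1, h2, h3, e4, e5, e6, if_true, Bool.false_eq_true, if_false,
        List.cons.injEq, Prod.mk.injEq, true_and, and_true]
      push_cast
      omega
    rw [Bool.not_eq_true] at h3
    by_cases h4 : PySem.Chars.startswith (PySem.Chars.strip l) ['#', '#', '#', '#', ' '] = true
    · have e5 : PySem.Chars.startswith (PySem.Chars.strip l) ['#', '#', '#', '#', '#', ' '] = false :=
      pv_excl _ 4 5 (by omega) h4
      have e6 : PySem.Chars.startswith (PySem.Chars.strip l) ['#', '#', '#', '#', '#', '#', ' '] = false :=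
      pv_excl _ 4 6 (by omega) h4
      have hd : pvStepA (PySem.Dict.mk
          [("h1", a1), ("h2", a2), ("h3", a3), ("h4", a4), ("h5", a5), ("h6", a6)]) l = PySem.Dict.mk [("h1", a1), ("h2", a2), ("h3", a3), ("h4", a4 + 1), ("h5", a5), ("h6", a6)] := by
        simp [pvStepA, h1, h2, h3, h4, PySem.Dict.modify, PySem.Dict.insert,
          PySem.Dict.getD, PySem.Dict.get?, PySem.Dict.contains]
      rw [hd, ih]
      simp only [List.countP_cons, h1, h2, h3, h4, e5, e6, if_true, Bool.false_eq_true, if_false,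
        List.cons.injEq, Prod.mk.injEq, true_and, and_true]
      push_cast
      omega
    rw [Bool.not_eq_true] at h4
    by_cases h5 : PySem.Chars.startswith (PySem.Chars.strip l) ['#', '#', '#', '#', '#', ' '] = true
    · have e6 : PySem.Chars.startswith (PySem.Chars.strip l) ['#', '#', '#', '#', '#', '#', ' '] = false :=
      pv_excl _ 5 6 (by omega) h5
      have hd : pvStepA (PySem.Dict.mk
          [("h1", a1), ("h2", a2), ("h3", a3), ("h4", a4), ("h5", a5), ("h6", a6)]) l = PySem.Dict.mk [("h1", a1), ("h2", a2), ("h3", a3), ("h4", a4), ("h5", a5 + 1), ("h6", a6)] := by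
        simp [pvStepA, h1, h2, h3, h4, h5, PySem.Dict.modify, PySem.Dict.insert,
          PySem.Dict.getD, PySem.Dict.get?, PySem.Dict.contains]
      rw [hd, ih]
      simp only [List.countP_cons, h1, h2, h3, h4, h5, e6, if_true, Bool.false_eq_true, if_false,
        List.cons.injEq, Prod.mk.injEq, true_and, and_true]
      push_cast
      omega
    rw [Bool.not_eq_true] at h5
    by_cases h6 : PySem.Chars.startswith (PySem.Chars.strip l) ['#', '#', '#', '#', '#', '#', ' '] = true
    · have hd : pvStepA (PySem.Dict.mk
          [("h1", a1), ("h2", a2), ("h3", a3), ("h4", a4), ("h5", a5), ("h6", a6)]) l = PySem.Dict.mk [("h1", a1), ("h2", a2), ("h3", a3), ("h4", a4), ("h5", a5), ("h6", a6 + 1)] := by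
        simp [pvStepA, h1, h2, h3, h4, h5, h6, PySem.Dict.modify, PySem.Dict.insert,
          PySem.Dict.getD, PySem.Dict.get?, PySem.Dict.contains]
      rw [hd, ih]
      simp only [List.countP_cons, h1, h2, h3, h4, h5, h6, if_true, Bool.false_eq_true, if_false,
        List.cons.injEq, Prod.mk.injEq, true_and, and_true]
      push_cast
      omega
    rw [Bool.not_eq_true] at h6
    · have hd : pvStepA (PySem.Dict.mk
          [("h1", a1), ("h2", a2), ("h3", a3), ("h4", a4), ("h5", a5), ("h6", a6)]) l = PySem.Dict.mk
          [("h1", a1), ("h2", a2), ("h3", a3), ("h4", a4), ("h5", a5), ("h6", a6)] := by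
        simp [pvStepA, h1, h2, h3, h4, h5, h6]
      rw [hd, ih]
      simp only [List.countP_cons, h1, h2, h3, h4, h5, h6, Bool.false_eq_true, if_false,
        List.cons.injEq, Prod.mk.injEq, true_and, and_true]
      push_cast
      omega

-- ===== VERDICT (by name: the statement is the Claim_ definition above) =====
theorem count_headers_spec : Claim_equal_count_headers := by
  intro markdown _
  unfold Spec_count_headers count_headers count_headers_alt
  rw [pv_fold_items]
  have hr : PySem.List.pyRange 1 7 1 = [1, 2, 3, 4, 5, 6] := by decide
  rw [hr]
  simp only [List.map_cons, List.map_nil, List.countP_map, Function.comp_def,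
    ← List.countP_eq_length_filter,
    show "h" ++ PySem.Int.toStr 1 = "h1" from by decide,
    show "h" ++ PySem.Int.toStr 2 = "h2" from by decide,
    show "h" ++ PySem.Int.toStr 3 = "h3" from by decide,
    show "h" ++ PySem.Int.toStr 4 = "h4" from by decide,
    show "h" ++ PySem.Int.toStr 5 = "h5" from by decide,
    show "h" ++ PySem.Int.toStr 6 = "h6" from by decide,
    show List.replicate (Int.toNat 1) '#' ++ [' '] = ['#', ' '] from by decide,
    show List.replicate (Int.toNat 2) '#' ++ [' '] = ['#', '#', ' '] from by decide,
    show List.replicate (Int.toNat 3) '#' ++ [' '] = ['#', '#', '#', ' '] from by decide,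
    show List.replicate (Int.toNat 4) '#' ++ [' '] = ['#', '#', '#', '#', ' '] from by decide,
    show List.replicate (Int.toNat 5) '#' ++ [' '] = ['#', '#', '#', '#', '#', ' '] from by decide,
    show List.replicate (Int.toNat 6) '#' ++ [' '] = ['#', '#', '#', '#', '#', '#', ' '] from by decide]
  norm_num
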